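-- pv_equiv track=rewrite | github.com/racksyyy/IBS-2-Lab-Assignments | LabAssignment2.py | cyclic
-- ===== SOURCE A (Python) =====
-- def cyclic(p):
--     s = [0]
--     n = len(p)
--     d = p+p
--     for l in range(1,n):
--         for i in range(n):
--             s.append(sum(d[i:i+l]))
--     s.append(sum(p))
--     return sorted(s)
-- ===== SOURCE B (Python) =====
-- def cyclic(p):
--     # Prefix sums (kept via a running accumulator) over the doubled array give
--     # each cyclic window sum as one O(1) subtraction; windows come from one
--     # flat comprehension instead of per-window slice sums.
--     n = len(p)
--     pre = [0]
--     acc = 0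
--     for x in p + p:
--         acc += x
--         pre.append(acc)
--     sums = [pre[i + l] - pre[i] for l in range(1, n) for i in range(n)]
--     return sorted([0] + sums + [pre[n]])
-- ===== Notes on version B (the rewrite author's own statement) =====
-- stated objective: faster
-- what changed: B builds prefix sums of the doubled array once with a running accumulator and produces every cyclic window sum as an O(1) prefix-difference in one flat comprehension, instead of A's O(n)-per-window slice sums.
import Mathlib
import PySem

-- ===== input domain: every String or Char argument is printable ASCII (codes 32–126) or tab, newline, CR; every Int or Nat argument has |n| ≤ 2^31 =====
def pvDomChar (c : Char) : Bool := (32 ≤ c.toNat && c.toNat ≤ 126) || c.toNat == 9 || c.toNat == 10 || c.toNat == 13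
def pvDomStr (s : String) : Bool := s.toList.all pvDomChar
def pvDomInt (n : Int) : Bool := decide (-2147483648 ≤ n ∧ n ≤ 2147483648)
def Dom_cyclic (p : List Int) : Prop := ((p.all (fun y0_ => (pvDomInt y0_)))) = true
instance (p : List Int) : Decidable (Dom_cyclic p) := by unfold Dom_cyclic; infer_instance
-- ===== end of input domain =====

-- B replaces A's O(n)-per-window slice sums by O(1) prefix-sum differences over the doubled array (asymptotically faster).


-- ===== PORT A =====
def cyclic (p : List Int) : List Int :=
  let n : Int := p.length
  let d := p ++ p
  let s := (PySem.List.pyRange 1 n 1).foldl (fun s l =>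
    (PySem.List.pyRange 0 n 1).foldl (fun s i =>
      s ++ [(PySem.List.slice d (some i) (some (i + l))).sum]) s) [0]
  PySem.List.sorted (s ++ [p.sum]) (fun x => x) false

-- ===== PORT B =====
def cyclic_alt (p : List Int) : List Int :=
  let n : Int := p.length
  let st := (p ++ p).foldl (fun st x => (st.1 ++ [st.2 + x], st.2 + x)) ([0], 0)
  let pre := st.1
  let sums := (PySem.List.pyRange 1 n 1).flatMap (fun l =>
    (PySem.List.pyRange 0 n 1).map (fun i =>
      PySem.List.pyGetD pre (i + l) 0 - PySem.List.pyGetD pre i 0))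
  PySem.List.sorted ([0] ++ sums ++ [PySem.List.pyGetD pre n 0]) (fun x => x) false

-- ===== PRECONDITION & SPEC =====
def Spec_cyclic (p : List Int) (out : List Int) : Prop := out = cyclic_alt p
instance (p : List Int) (out : List Int) : Decidable (Spec_cyclic p out) := by unfold Spec_cyclic; infer_instance

-- ===== CLAIM (what is proved, stated in full; the proofs are below) =====
def Claim_equal_cyclic : Prop := ∀ (p : List Int), Dom_cyclic p → Spec_cyclic p (cyclic p)

-- ===== LEMMAS AND PROOFS =====

/-- Running partial sums of `d` starting from `a` (values appended by B's prefix loop). -/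
def psums (a : Int) : List Int → List Int
  | [] => []
  | x :: xs => (a + x) :: psums (a + x) xs

theorem psums_length (a : Int) (d : List Int) : (psums a d).length = d.length := by
  induction d generalizing a with
  | nil => rfl
  | cons x xs ih => simp [psums, ih]

/-- B's accumulator loop: the list component is `acc ++ psums a d`. -/
theorem pre_loop_eq (d : List Int) (acc : List Int) (a : Int) :
    (d.foldl (fun st x => (st.1 ++ [st.2 + x], st.2 + x)) (acc, a)).1
      = acc ++ psums a d := by
  induction d generalizing acc a with
  | nil => simp [psums]
  | cons x xs ih =>
    simp only [List.foldl_cons, psums]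
    have := ih (acc ++ [a + x]) (a + x)
    simpa using this

/-- Indexing the prefix-sum list: entry `k` is `a` plus the sum of the first `k` of `d`. -/
theorem psums_getD (d : List Int) (a : Int) (k : Nat) (hk : k ≤ d.length) :
    (a :: psums a d).getD k 0 = a + (d.take k).sum := by
  induction d generalizing a k with
  | nil =>
    have hk0 : k = 0 := by simpa using hk
    subst hk0; simp
  | cons x xs ih =>
    cases k with
    | zero => simp
    | succ k =>
      simp only [psums, List.getD, List.getElem?_cons_succ, List.take_succ_cons, List.sum_cons]
      have := ih (a + x) k (by simpa using hk)
      simp only [List.getD] at this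
      rw [this]; ring

theorem sum_drop_take (d : List Int) (i l : Nat) :
    ((d.drop i).take l).sum = (d.take (i + l)).sum - (d.take i).sum := by
  rw [List.take_add, List.sum_append]; ring

/-- The window value A computes equals B's prefix-sum difference. -/
theorem window_eq (p : List Int) (i l : Int) (hi0 : 0 ≤ i) (hin : i < (p.length : Int))
    (hl0 : 0 ≤ l) (hln : l < (p.length : Int)) :
    (PySem.List.slice (p ++ p) (some i) (some (i + l))).sum
      = PySem.List.pyGetD (0 :: psums 0 (p ++ p)) (i + l) 0
        - PySem.List.pyGetD (0 :: psums 0 (p ++ p)) i 0 := by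
  have hlen : (0 :: psums 0 (p ++ p)).length = 2 * p.length + 1 := by
    simp [psums_length]; omega
  rw [PySem.List.slice_toNat _ hi0 (by omega)]
  rw [PySem.List.pyGetD_eq_getElem _ 0 (by omega) (by simp [hlen]; omega)]
  rw [PySem.List.pyGetD_eq_getElem _ 0 hi0 (by simp [hlen]; omega)]
  rw [List.getElem_eq_getD 0, List.getElem_eq_getD 0]
  rw [psums_getD _ _ _ (by simp; omega), psums_getD _ _ _ (by simp; omega)]
  rw [sum_drop_take]
  have : (i + l).toNat = i.toNat + ((i + l).toNat - i.toNat) := by omega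
  rw [← this]; ring

theorem pre_getD_n (p : List Int) :
    PySem.List.pyGetD (0 :: psums 0 (p ++ p)) (p.length : Int) 0 = p.sum := by
  have hlen : (0 :: psums 0 (p ++ p)).length = 2 * p.length + 1 := by
    simp [psums_length]; omega
  rw [PySem.List.pyGetD_eq_getElem _ 0 (by omega) (by simp [hlen]; omega)]
  rw [List.getElem_eq_getD 0]
  rw [psums_getD _ _ _ (by simp)]
  simp

-- ===== VERDICT (by name: the statement is the Claim_ definition above) =====
theorem cyclic_spec : Claim_equal_cyclic := by
  intro p _
  unfold Spec_cyclic
  simp only [cyclic, cyclic_alt]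
  have hpre : ((p ++ p).foldl (fun st x => (st.1 ++ [st.2 + x], st.2 + x)) ([0], 0)).1
      = 0 :: psums 0 (p ++ p) := by
    have := pre_loop_eq (p ++ p) [0] 0
    simpa using this
  rw [hpre, pre_getD_n]
  -- rewrite A's nested append-loops as [0] ++ flatMap of maps
  have hA : (PySem.List.pyRange 1 (p.length : Int) 1).foldl (fun s l =>
        (PySem.List.pyRange 0 (p.length : Int) 1).foldl (fun s i =>
          s ++ [(PySem.List.slice (p ++ p) (some i) (some (i + l))).sum]) s) [0]
      = [0] ++ (PySem.List.pyRange 1 (p.length : Int) 1).flatMap (fun l =>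
          (PySem.List.pyRange 0 (p.length : Int) 1).map (fun i =>
            (PySem.List.slice (p ++ p) (some i) (some (i + l))).sum)) := by
    rw [show (fun s l =>
        (PySem.List.pyRange 0 (p.length : Int) 1).foldl (fun s i =>
          s ++ [(PySem.List.slice (p ++ p) (some i) (some (i + l))).sum]) s)
      = (fun s l => s ++ (PySem.List.pyRange 0 (p.length : Int) 1).map (fun i =>
          (PySem.List.slice (p ++ p) (some i) (some (i + l))).sum)) from by
        funext s l; exact PySem.List.foldl_append_singleton_eq_map _ _ _]
    exact PySem.List.foldl_append_eq_flatMap _ _ _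
  rw [hA]
  congr 1
  congr 1
  congr 1
  apply List.flatMap_congr
  intro l hl
  apply List.map_congr_left
  intro i hi
  rw [PySem.List.mem_pyRange_one] at hl hi
  exact window_eq p i l hi.1 hi.2 (by omega) hl.2
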